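-- pv_equiv track=rewrite | github.com/Osmanyasal/data_privacy_project | anonymization/k_anonymity.py | is_dataset_k_anonymous
-- ===== SOURCE A (Python) =====
-- def is_dataset_k_anonymous(raw_dataset,DGHs,k_value):
--     column_based_group_dic = {}
--     for row in raw_dataset:
--         key = ""
--         for column in row.keys():
--             if column in DGHs:
--                 key += row[column]+"_"
--         if key in column_based_group_dic:
--             column_based_group_dic[key] += 1
--         else: column_based_group_dic[key] = 1
--
--     return column_based_group_dic[min(column_based_group_dic, key=column_based_group_dic.get)] >= k_value
-- ===== SOURCE B (Python) =====
-- def is_dataset_k_anonymous(raw_dataset, DGHs, k_value):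
--     # sort the per-row DGH keys, then scan contiguous runs: every class size must reach k
--     keys = sorted("".join(row[c] + "_" for c in row if c in DGHs) for row in raw_dataset)
--     prev, run, ok = None, 0, True
--     for key in keys:
--         if key == prev:
--             run += 1
--         else:
--             ok = ok and (prev is None or run >= k_value)
--             prev, run = key, 1
--     return ok and (prev is None or run >= k_value)
-- ===== Notes on version B (the rewrite author's own statement) =====
-- stated objective: alternative
-- what changed: Replaces A's hash-dict counting plus min(dict, key=dict.get) by sorting the per-row DGH keys once and scanning contiguous runs, checking every run length against k in a single pass.
-- crash fix: On an empty dataset A raises ValueError (min() of an empty dict) while B returns True (every equivalence class trivially has at least k rows). — e.g. on is_dataset_k_anonymous([], [("zip", ["0"])], 2): A raises ValueError, B returns true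
import Mathlib
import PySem

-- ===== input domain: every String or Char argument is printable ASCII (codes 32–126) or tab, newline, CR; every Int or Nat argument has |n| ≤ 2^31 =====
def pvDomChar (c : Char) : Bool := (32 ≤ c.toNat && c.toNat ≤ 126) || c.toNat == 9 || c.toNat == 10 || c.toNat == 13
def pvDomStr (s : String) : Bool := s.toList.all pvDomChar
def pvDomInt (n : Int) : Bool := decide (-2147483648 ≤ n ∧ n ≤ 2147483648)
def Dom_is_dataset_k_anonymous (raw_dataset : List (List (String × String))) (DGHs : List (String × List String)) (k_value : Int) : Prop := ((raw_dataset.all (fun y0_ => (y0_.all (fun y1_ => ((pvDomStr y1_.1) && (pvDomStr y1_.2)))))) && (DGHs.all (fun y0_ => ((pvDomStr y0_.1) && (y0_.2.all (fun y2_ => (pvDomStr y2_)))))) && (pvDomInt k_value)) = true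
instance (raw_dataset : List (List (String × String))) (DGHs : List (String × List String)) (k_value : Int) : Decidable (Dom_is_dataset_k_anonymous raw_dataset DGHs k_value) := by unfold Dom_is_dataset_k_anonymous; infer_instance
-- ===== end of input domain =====

-- B replaces A's dict-counting + min(dict, key=dict.get) by sort-the-row-keys + a single scan over
-- contiguous runs (alternative decomposition, same cost class). Keys are built on the List Char side.

-- ===== PORT A =====
-- A's inner loop: for column in row.keys(): if column in DGHs: key += row[column] + "_"
def pvKeyA (DGHs : List (String × List String)) (row : List (String × String)) : List Char :=
  (PySem.Dict.ofList row).items.foldl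
    (fun key p => if (PySem.Dict.ofList DGHs).contains p.1 then key ++ (p.2.toList ++ ['_']) else key)
    []

-- A's outer loop building column_based_group_dic
def pvDicA (raw_dataset : List (List (String × String))) (DGHs : List (String × List String)) :
    PySem.Dict (List Char) Int :=
  raw_dataset.foldl
    (fun d row =>
      if d.contains (pvKeyA DGHs row) then d.insert (pvKeyA DGHs row) (d.getD (pvKeyA DGHs row) 0 + 1)
      else d.insert (pvKeyA DGHs row) 1)
    PySem.Dict.empty

def is_dataset_k_anonymous (raw_dataset : List (List (String × String))) (DGHs : List (String × List String)) (k_value : Int) : Bool :=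
  -- min(column_based_group_dic, key=column_based_group_dic.get); dic.get is total here (getD 0)
  -- since min only applies it to keys of the dict
  match PySem.List.min? (pvDicA raw_dataset DGHs).keys (fun key => (pvDicA raw_dataset DGHs).getD key 0) with
  | some m => decide (k_value ≤ (pvDicA raw_dataset DGHs).getD m 0)
  | none => false   -- Python: min() of the empty dict raises ValueError (excluded by Pre_)

-- ===== PORT B =====
-- B's key: "".join(row[c] + "_" for c in row if c in DGHs)
def pvKeyB (DGHs : List (String × List String)) (row : List (String × String)) : List Char :=
  PySem.Chars.join []
    (((PySem.Dict.ofList row).items.filter (fun p => (PySem.Dict.ofList DGHs).contains p.1)).map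
      (fun p => p.2.toList ++ ['_']))

-- keys = sorted(...)
def pvSortedB (raw_dataset : List (List (String × String))) (DGHs : List (String × List String)) :
    List (List Char) :=
  PySem.List.sorted (raw_dataset.map (pvKeyB DGHs)) (fun x => x) false

-- one iteration of B's scan; state = (prev, run, ok)
def pvStep (k_value : Int) (st : Option (List Char) × Int × Bool) (key : List Char) :
    Option (List Char) × Int × Bool :=
  if some key == st.1 then (st.1, st.2.1 + 1, st.2.2)
  else (some key, 1, st.2.2 && (st.1 == none || decide (k_value ≤ st.2.1)))

-- B's final line: ok and (prev is None or run >= k_value)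
def pvFin (k_value : Int) (st : Option (List Char) × Int × Bool) : Bool :=
  st.2.2 && (st.1 == none || decide (k_value ≤ st.2.1))

def is_dataset_k_anonymous_alt (raw_dataset : List (List (String × String))) (DGHs : List (String × List String)) (k_value : Int) : Bool :=
  pvFin k_value ((pvSortedB raw_dataset DGHs).foldl (pvStep k_value) (none, 0, true))

-- ===== PRECONDITION & SPEC =====
-- Pre_ excludes only the empty dataset, on which A's min() over an empty dict raises ValueError.
def Pre_is_dataset_k_anonymous (raw_dataset : List (List (String × String))) (DGHs : List (String × List String)) (k_value : Int) : Prop := raw_dataset ≠ []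
instance (raw_dataset : List (List (String × String))) (DGHs : List (String × List String)) (k_value : Int) : Decidable (Pre_is_dataset_k_anonymous raw_dataset DGHs k_value) := by unfold Pre_is_dataset_k_anonymous; infer_instance

def pvWitness_is_dataset_k_anonymous : (List (List (String × String))) × (List (String × List String)) × Int :=
  ([[("zip", "02139"), ("age", "20-30")]], [("zip", ["0"]), ("age", ["*"])], 1)

-- On the empty dataset A raises ValueError (min of an empty dict) while B returns True (every class trivially has ≥ k rows).
def Raises_is_dataset_k_anonymous (raw_dataset : List (List (String × String))) (DGHs : List (String × List String)) (k_value : Int) : Prop := raw_dataset = []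
instance (raw_dataset : List (List (String × String))) (DGHs : List (String × List String)) (k_value : Int) : Decidable (Raises_is_dataset_k_anonymous raw_dataset DGHs k_value) := by unfold Raises_is_dataset_k_anonymous; infer_instance
def pvRaiseWitness_is_dataset_k_anonymous : (List (List (String × String))) × (List (String × List String)) × Int := ([], [("zip", ["0"])], 2)
def pvRaiseWitnessOut_is_dataset_k_anonymous : Bool := true

def Spec_is_dataset_k_anonymous (raw_dataset : List (List (String × String))) (DGHs : List (String × List String)) (k_value : Int) (out : Bool) : Prop := out = is_dataset_k_anonymous_alt raw_dataset DGHs k_value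
instance (raw_dataset : List (List (String × String))) (DGHs : List (String × List String)) (k_value : Int) (out : Bool) : Decidable (Spec_is_dataset_k_anonymous raw_dataset DGHs k_value out) := by unfold Spec_is_dataset_k_anonymous; infer_instance

-- ===== CLAIM (what is proved, stated in full; the proofs are below) =====
def Claim_equal_is_dataset_k_anonymous : Prop := ∀ (raw_dataset : List (List (String × String))) (DGHs : List (String × List String)) (k_value : Int), Dom_is_dataset_k_anonymous raw_dataset DGHs k_value → Pre_is_dataset_k_anonymous raw_dataset DGHs k_value → Spec_is_dataset_k_anonymous raw_dataset DGHs k_value (is_dataset_k_anonymous raw_dataset DGHs k_value)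
def Claim_raises_is_dataset_k_anonymous : Prop := (∀ (raw_dataset : List (List (String × String))) (DGHs : List (String × List String)) (k_value : Int), Dom_is_dataset_k_anonymous raw_dataset DGHs k_value → Raises_is_dataset_k_anonymous raw_dataset DGHs k_value → ¬ Pre_is_dataset_k_anonymous raw_dataset DGHs k_value) ∧ (Dom_is_dataset_k_anonymous (pvRaiseWitness_is_dataset_k_anonymous.1) (pvRaiseWitness_is_dataset_k_anonymous.2.1) (pvRaiseWitness_is_dataset_k_anonymous.2.2) ∧ Raises_is_dataset_k_anonymous (pvRaiseWitness_is_dataset_k_anonymous.1) (pvRaiseWitness_is_dataset_k_anonymous.2.1) (pvRaiseWitness_is_dataset_k_anonymous.2.2) ∧ is_dataset_k_anonymous_alt (pvRaiseWitness_is_dataset_k_anonymous.1) (pvRaiseWitness_is_dataset_k_anonymous.2.1) (pvRaiseWitness_is_dataset_k_anonymous.2.2) = pvRaiseWitnessOut_is_dataset_k_anonymous)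

-- ===== LEMMAS AND PROOFS =====

-- the two key builders agree
lemma pvKey_eq (DGHs : List (String × List String)) (row : List (String × String)) :
    pvKeyA DGHs row = pvKeyB DGHs row := by
  unfold pvKeyA pvKeyB
  rw [PySem.List.foldl_if_eq_foldl_filter, PySem.List.foldl_append_eq_flatMap]
  have h : ∀ parts : List (List Char), PySem.Chars.join [] parts = parts.flatten := by
    intro parts
    simp only [PySem.Chars.join]
    induction parts with
    | nil => simp [List.intercalate]
    | cons h t ih => cases t <;> simp_all [List.intercalate, List.intersperse, List.flatten]
  rw [h, List.flatMap_def, List.nil_append]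

-- A's counting loop builds Counter(keys)
lemma pvDic_eq (raw_dataset : List (List (String × String))) (DGHs : List (String × List String)) :
    pvDicA raw_dataset DGHs = PySem.Dict.counter (raw_dataset.map (pvKeyA DGHs)) := by
  unfold pvDicA
  rw [← PySem.Dict.foldl_insert_getD_add_one_eq_counter, List.foldl_map]
  apply PySem.List.foldl_congr_mem
  intro d row _
  by_cases h : d.contains (pvKeyA DGHs row) = true
  · simp [h]
  · have h0 := PySem.Dict.getD_of_not_contains (d := d) (k := pvKeyA DGHs row) (d0 := (0 : Int))
      (by simpa using h)
    simp [h, h0]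

-- characterisation of A: "the minimum class size is ≥ k"  =  "every key's count is ≥ k"
lemma pvA_char (raw_dataset : List (List (String × String))) (DGHs : List (String × List String))
    (k_value : Int) (hne : raw_dataset ≠ []) :
    is_dataset_k_anonymous raw_dataset DGHs k_value
      = decide (∀ x ∈ raw_dataset.map (pvKeyA DGHs), k_value ≤ ((raw_dataset.map (pvKeyA DGHs)).count x : Int)) := by
  unfold is_dataset_k_anonymous
  rw [pvDic_eq]
  have hksne : raw_dataset.map (pvKeyA DGHs) ≠ [] := by simpa using hne
  have hkeys : (PySem.Dict.counter (raw_dataset.map (pvKeyA DGHs))).keys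
      = PySem.Set.ofList (raw_dataset.map (pvKeyA DGHs)) := PySem.Dict.keys_counter _
  have hkeysne : (PySem.Dict.counter (raw_dataset.map (pvKeyA DGHs))).keys ≠ [] := by
    rw [hkeys]
    intro h
    rcases List.exists_mem_of_ne_nil _ hksne with ⟨a, ha⟩
    have : a ∈ PySem.Set.ofList (raw_dataset.map (pvKeyA DGHs)) := by
      rw [PySem.Set.mem_ofList]; exact ha
    rw [h] at this
    cases this
  rcases hmin : PySem.List.min? (PySem.Dict.counter (raw_dataset.map (pvKeyA DGHs))).keys
      (fun key => (PySem.Dict.counter (raw_dataset.map (pvKeyA DGHs))).getD key 0) with _ | m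
  · exact absurd ((PySem.List.min?_eq_none_iff _ _).mp hmin) hkeysne
  · have hm : m ∈ raw_dataset.map (pvKeyA DGHs) := by
      have := PySem.List.min?_mem hmin
      rw [hkeys, PySem.Set.mem_ofList] at this
      exact this
    have hmn := PySem.List.min?_isMin hmin
    simp only [PySem.Dict.getD_counter] at hmn ⊢
    rw [Bool.eq_iff_iff]
    simp only [decide_eq_true_eq]
    constructor
    · intro h x hx
      have hxk : x ∈ (PySem.Dict.counter (raw_dataset.map (pvKeyA DGHs))).keys := by
        rw [hkeys, PySem.Set.mem_ofList]; exact hx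
      exact le_trans h (hmn x hxk)
    · intro h
      exact h m hm

-- instance bridge: the port's sorted (core List LT) is sorted under the linear order on List Char
lemma pv_sorted_inst (ks : List (List Char)) :
    PySem.List.sorted ks (fun x => x) false
      = @PySem.List.sorted (List Char) (List Char) List.instLinearOrder.toLT LinearOrder.toDecidableLT ks (fun x => x) false :=
  congrArg (fun d : DecidableLT (List Char) =>
    @PySem.List.sorted (List Char) (List Char) List.instLinearOrder.toLT d ks (fun x => x) false)
    (Subsingleton.elim _ _)

-- splitting "every element of x :: t occurs ≥ k times" at the head
lemma pv_split_count (k : Int) (x : List Char) (t : List (List Char)) :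
    (∀ y ∈ x :: t, k ≤ (((x :: t).count y : Nat) : Int))
      ↔ (k ≤ 1 + (t.count x : Int)) ∧ (∀ y ∈ t, y ≠ x → k ≤ ((t.count y : Nat) : Int)) := by
  constructor
  · intro h
    refine ⟨?_, ?_⟩
    · have := h x (by simp)
      rw [List.count_cons_self] at this
      push_cast at this ⊢
      omega
    · intro y hy hyx
      have := h y (by simp [hy])
      rwa [List.count_cons_of_ne (Ne.symm hyx)] at this
  · rintro ⟨h1, h2⟩ y hy
    rw [List.mem_cons] at hy
    by_cases hyx : y = x
    · subst hyx
      rw [List.count_cons_self]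
      push_cast at h1 ⊢
      omega
    · rw [List.count_cons_of_ne (Ne.symm hyx)]
      exact h2 y (hy.resolve_left hyx) hyx

-- invariant of B's run scan over the sorted tail, with prev = p and current run r
lemma pvFold_spec (k : Int) (l : List (List Char)) (p : List Char) (r : Int) (ok : Bool)
    (hs : l.Pairwise (· ≤ ·)) (hp : ∀ x ∈ l, p ≤ x) :
    pvFin k (l.foldl (pvStep k) (some p, r, ok))
      = (ok && decide (k ≤ r + (l.count p : Int))
          && decide (∀ x ∈ l, x ≠ p → k ≤ ((l.count x : Nat) : Int))) := by
  induction l generalizing p r ok with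
  | nil =>
    simp [pvFin]
    congr 1
  | cons x t ih =>
    rw [List.pairwise_cons] at hs
    by_cases hxp : x = p
    · subst hxp
      have h1 : pvStep k (some x, r, ok) x = (some x, r + 1, ok) := by simp [pvStep]
      rw [List.foldl_cons, h1, ih x (r + 1) ok hs.2 hs.1]
      rw [Bool.eq_iff_iff]
      simp only [Bool.and_eq_true, decide_eq_true_eq]
      constructor
      · rintro ⟨⟨hok, hc⟩, hrest⟩
        refine ⟨⟨hok, by rw [List.count_cons_self]; push_cast at hc ⊢; omega⟩, ?_⟩
        intro y hy hyx
        rw [List.mem_cons] at hy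
        rcases hy with h | h
        · exact absurd h hyx
        · rw [List.count_cons_of_ne (Ne.symm hyx)]; exact hrest y h hyx
      · rintro ⟨⟨hok, hc⟩, hrest⟩
        refine ⟨⟨hok, by rw [List.count_cons_self] at hc; push_cast at hc; omega⟩, ?_⟩
        intro y hy hyx
        have := hrest y (by simp [hy]) hyx
        rwa [List.count_cons_of_ne (Ne.symm hyx)] at this
    · -- a new run starts at x; p cannot occur again in x :: t
      have hpx : p ≤ x := hp x (by simp)
      have hnp : p ∉ x :: t := by
        intro hmem
        rw [List.mem_cons] at hmem
        rcases hmem with h | hmem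
        · exact hxp h.symm
        · exact hxp (le_antisymm (hs.1 p hmem) hpx)
      have hcp : (x :: t).count p = 0 := List.count_eq_zero.mpr hnp
      have h1 : pvStep k (some p, r, ok) x = (some x, 1, ok && decide (k ≤ r)) := by
        simp [pvStep, hxp]
      rw [List.foldl_cons, h1, ih x 1 (ok && decide (k ≤ r)) hs.2 hs.1]
      rw [Bool.eq_iff_iff]
      simp only [Bool.and_eq_true, decide_eq_true_eq]
      have hsplit := pv_split_count k x t
      constructor
      · rintro ⟨⟨⟨hok, hr⟩, hc⟩, hrest⟩
        refine ⟨⟨hok, by rw [hcp]; push_cast; omega⟩, ?_⟩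
        intro y hy _
        exact (hsplit.mpr ⟨by omega, hrest⟩) y hy
      · rintro ⟨⟨hok, hr⟩, hrest⟩
        rw [hcp] at hr
        have hall : ∀ y ∈ x :: t, k ≤ (((x :: t).count y : Nat) : Int) := by
          intro y hy
          refine hrest y hy ?_
          intro hyp; subst hyp; exact hnp hy
        have h2 := hsplit.mp hall
        exact ⟨⟨⟨hok, by push_cast at hr ⊢; omega⟩, by have := h2.1; push_cast at this ⊢; omega⟩, h2.2⟩

-- B's scan over any sorted list decides "every element occurs ≥ k times"
lemma pvRun_sorted (k : Int) (S : List (List Char)) (hpw : S.Pairwise (· ≤ ·)) :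
    pvFin k (S.foldl (pvStep k) (none, 0, true))
      = decide (∀ x ∈ S, k ≤ ((S.count x : Nat) : Int)) := by
  cases S with
  | nil => simp [pvFin]
  | cons s t =>
    rw [List.pairwise_cons] at hpw
    have h1 : pvStep k (none, 0, true) s = (some s, 1, true) := by simp [pvStep]
    rw [List.foldl_cons, h1, pvFold_spec k t s 1 true hpw.2 hpw.1]
    rw [Bool.eq_iff_iff]
    simp only [Bool.and_eq_true, decide_eq_true_eq, true_and]
    have hsplit := pv_split_count k s t
    constructor
    · rintro ⟨hc, hrest⟩
      exact hsplit.mpr ⟨by omega, hrest⟩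
    · intro h
      have h2 := hsplit.mp h
      exact ⟨by have := h2.1; push_cast at this ⊢; omega, h2.2⟩

-- characterisation of B
lemma pvB_char (raw_dataset : List (List (String × String))) (DGHs : List (String × List String))
    (k_value : Int) :
    is_dataset_k_anonymous_alt raw_dataset DGHs k_value
      = decide (∀ x ∈ raw_dataset.map (pvKeyB DGHs), k_value ≤ ((raw_dataset.map (pvKeyB DGHs)).count x : Int)) := by
  unfold is_dataset_k_anonymous_alt
  have hpw : (pvSortedB raw_dataset DGHs).Pairwise (· ≤ ·) := by
    unfold pvSortedB
    rw [pv_sorted_inst]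
    exact PySem.List.sorted_pairwise _ _
  have hperm : (pvSortedB raw_dataset DGHs).Perm (raw_dataset.map (pvKeyB DGHs)) :=
    PySem.List.sorted_perm _ _ _
  rw [pvRun_sorted k_value _ hpw]
  rw [Bool.eq_iff_iff]
  simp only [decide_eq_true_eq]
  constructor
  · intro h x hx
    have := h x (hperm.mem_iff.mpr hx)
    rwa [hperm.count_eq] at this
  · intro h x hx
    rw [hperm.count_eq]
    exact h x (hperm.mem_iff.mp hx)

-- ===== VERDICT (by name: the statement is the Claim_ definition above) =====
theorem is_dataset_k_anonymous_spec : Claim_equal_is_dataset_k_anonymous := by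
  intro raw_dataset DGHs k_value _ hpre
  unfold Spec_is_dataset_k_anonymous
  rw [pvA_char raw_dataset DGHs k_value hpre, pvB_char raw_dataset DGHs k_value]
  have hkey : raw_dataset.map (pvKeyA DGHs) = raw_dataset.map (pvKeyB DGHs) :=
    List.map_congr_left (fun row _ => pvKey_eq DGHs row)
  rw [hkey]

theorem is_dataset_k_anonymous_raises : Claim_raises_is_dataset_k_anonymous := by
  unfold Claim_raises_is_dataset_k_anonymous
  constructor
  · intro raw_dataset DGHs k_value _ hr hpre
    exact hpre hr
  · exact ⟨by decide, by decide, by decide⟩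

-- self-check: B's port really returns the stated value at the raise witness
theorem pvRaiseWitnessCheck_ok :
    is_dataset_k_anonymous_alt pvRaiseWitness_is_dataset_k_anonymous.1
      pvRaiseWitness_is_dataset_k_anonymous.2.1 pvRaiseWitness_is_dataset_k_anonymous.2.2
      = pvRaiseWitnessOut_is_dataset_k_anonymous :=
  is_dataset_k_anonymous_raises.2.2.2
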